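-- pv_equiv track=rewrite | github.com/cuadchris/code_wars | python/spinning_rings.py | spinning_rings
-- ===== SOURCE A (Python) =====
-- def spinning_rings(inner_max, outer_max):
--
--     inn = inner_max
--     out = 1
--     spins = 1
--
--     while inn != out:
--         if inn == 0:
--             inn = inner_max + 1
--         if out == outer_max:
--             out = -1
--         inn -= 1
--         out += 1
--         spins += 1
--
--     return spins
-- ===== SOURCE B (Python) =====
-- def spinning_rings(inner_max, outer_max):
--     # Ring positions after t steps: inner shows (-t) % M, outer shows t % N.
--     # For each possible common value v, the steps where both show v form one
--     # residue class mod lcm(M, N), found by CRT; the answer is the least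
--     # positive step over all candidate values v, taken without simulating the rings.
--     M = inner_max + 1
--     N = outer_max + 1
--     g = _gcd(M, N)
--     Mg = M // g
--     u = pow((N // g) % Mg, -1, Mg) if Mg > 1 else 0   # inverse of N//g modulo Mg
--     best = N * Mg                                     # lcm(M, N): first meet at value 0
--     for v in range(1, min(M, N)):
--         if v >= best:
--             break        # every later candidate is at least v, hence not smaller
--         if (2 * v) % g == 0:
--             k = (-2 * v // g) * u % Mg
--             t = v + N * k        # least nonnegative step with both rings showing v
--             if t < best:
--                 best = t
--     return best
--
--
-- def _gcd(a, b):
--     while b != 0: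
--         a, b = b, a % b
--     return a
-- ===== Notes on version B (the rewrite author's own statement) =====
-- stated objective: alternative
-- what changed: A simulates both rings step by step until the values coincide; B solves, for each possible common value v, the pair of congruences t = v mod outer_max+1 and t = -v mod inner_max+1 by CRT with an extended-gcd modular inverse and returns the least positive solution, scanning candidate common values with an early break.
-- intended difference: On outer_max = 0 (one-position outer ring) with odd inner_max >= 1, A returns (inner_max+1)/2, a step at which its never-wrapping outer counter merely equals the inner value (a value > outer_max the outer ring cannot show, because A's wrap test 'out == outer_max' never fires when out starts at 1 and outer_max is 0); B returns inner_max+1, the first step at which both rings actually show the only possible common value 0. — e.g. on spinning_rings(3, 0): A returns 2, B returns 4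
-- outside the precondition, e.g. on spinning_rings(3, -2): A returns 2, B returns 4
import Mathlib
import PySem

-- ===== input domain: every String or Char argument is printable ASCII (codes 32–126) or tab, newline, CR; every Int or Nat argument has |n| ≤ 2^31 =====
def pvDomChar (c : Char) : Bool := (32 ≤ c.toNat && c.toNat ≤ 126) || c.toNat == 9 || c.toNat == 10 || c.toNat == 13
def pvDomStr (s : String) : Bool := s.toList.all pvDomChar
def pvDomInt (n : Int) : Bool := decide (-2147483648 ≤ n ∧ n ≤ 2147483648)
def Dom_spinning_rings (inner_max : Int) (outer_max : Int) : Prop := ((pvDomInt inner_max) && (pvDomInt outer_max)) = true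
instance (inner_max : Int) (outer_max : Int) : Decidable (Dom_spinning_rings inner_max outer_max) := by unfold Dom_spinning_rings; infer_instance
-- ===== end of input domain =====

-- B replaces A's step-by-step simulation of the two rings by per-value CRT:
-- for each possible common value v it computes the first step where both rings
-- show v from one modular-inverse formula, and takes the minimum.

-- ===== PORT A =====
-- fuel-based transcription of A's while loop; fuel bounds the iteration count
-- and is never exhausted on inputs satisfying Pre_ (the loop meets by then)
def spinLoopA (m n : Int) : Nat → Int → Int → Int → Int
  | 0, _, _, spins => spins
  | f + 1, inn, out, spins =>
      if inn = out then spins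
      else
        let inn1 := if inn = 0 then m + 1 else inn
        let out1 := if out = n then -1 else out
        spinLoopA m n f (inn1 - 1) (out1 + 1) (spins + 1)

def spinning_rings (inner_max : Int) (outer_max : Int) : Int :=
  spinLoopA inner_max outer_max
    (((inner_max + 1) * (outer_max + 1)).toNat + (inner_max + 1).toNat + 1) inner_max 1 1

-- ===== PORT B =====
-- Source B's _gcd: while b != 0: a, b = b, a % b
-- (fueled structural recursion; |b| strictly drops each turn, so fuel |b|+1 is
-- never exhausted and the 0-fuel branch is unreachable)
def spinGcdF : Nat → Int → Int → Int
  | 0, a, _ => a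
  | f + 1, a, b => if b = 0 then a else spinGcdF f b (PySem.Int.mod a b)

def spinGcd (a b : Int) : Int := spinGcdF (b.natAbs + 1) a b

-- Source B's for-loop over candidate common values v, with the early break
def spinLoopB (g u N Mg : Int) : List Int → Int → Int
  | [], best => best
  | v :: vs, best =>
      if best ≤ v then best        -- Source B: if v >= best: break
      else if PySem.Int.mod (2 * v) g = 0 then
        let k := PySem.Int.mod (PySem.Int.floordiv (-2 * v) g * u) Mg
        let t := v + N * k
        spinLoopB g u N Mg vs (if t < best then t else best)
      else spinLoopB g u N Mg vs best

def spinning_rings_alt (inner_max : Int) (outer_max : Int) : Int :=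
  let M := inner_max + 1
  let N := outer_max + 1
  let g := spinGcd M N
  let Mg := PySem.Int.floordiv M g
  -- pow((N // g) % Mg, -1, Mg): the modular inverse, ported as Bezout coefficient mod Mg
  let u := if 1 < Mg then
      PySem.Int.mod (Nat.gcdA (PySem.Int.mod (PySem.Int.floordiv N g) Mg).toNat Mg.toNat) Mg
    else 0
  spinLoopB g u N Mg (PySem.List.pyRange 1 (min M N) 1) (N * Mg)

-- ===== PRECONDITION & SPEC =====
-- Pre_ excludes negative inner_max (A never terminates there) and negative
-- outer_max (outside the natural domain of ring sizes: positions 0..outer_max;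
-- A accidentally returns on odd inner_max there because the outer ring never
-- wraps), and, for outer_max = 0, the even inner_max on which A never terminates.
def Pre_spinning_rings (inner_max : Int) (outer_max : Int) : Prop :=
  0 ≤ inner_max ∧ (1 ≤ outer_max ∨ (outer_max = 0 ∧ inner_max % 2 = 1))
instance (inner_max : Int) (outer_max : Int) : Decidable (Pre_spinning_rings inner_max outer_max) := by
  unfold Pre_spinning_rings; infer_instance

def pvWitness_spinning_rings : Int × Int := (3, 2)

-- On outer_max = 0 (a one-position outer ring, which only ever shows 0) with odd
-- inner_max, A returns (inner_max+1)/2, a step where the rings hold the equal but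
-- impossible value (inner_max+1)/2 > outer_max because A's wrap test never fires
-- (out starts at 1 and is only reset upon reaching outer_max = 0); B returns
-- inner_max + 1, the first step where both rings actually show the value 0.
def D_spinning_rings (inner_max : Int) (outer_max : Int) : Prop :=
  outer_max = 0 ∧ 1 ≤ inner_max ∧ inner_max % 2 = 1
instance (inner_max : Int) (outer_max : Int) : Decidable (D_spinning_rings inner_max outer_max) := by
  unfold D_spinning_rings; infer_instance

def Spec_spinning_rings (inner_max : Int) (outer_max : Int) (out : Int) : Prop :=
  ¬ D_spinning_rings inner_max outer_max → out = spinning_rings_alt inner_max outer_max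
instance (inner_max : Int) (outer_max : Int) (out : Int) : Decidable (Spec_spinning_rings inner_max outer_max out) := by
  unfold Spec_spinning_rings; infer_instance

def pvDiffWitness_spinning_rings : Int × Int := (3, 0)
def pvDiffWitnessOut_spinning_rings : Int × Int := (2, 4)

-- ===== CLAIM (what is proved, stated in full; the proofs are below) =====
def Claim_unchanged_spinning_rings : Prop := ∀ (inner_max : Int) (outer_max : Int), Dom_spinning_rings inner_max outer_max → Pre_spinning_rings inner_max outer_max → Spec_spinning_rings inner_max outer_max (spinning_rings inner_max outer_max)
def Claim_changed_spinning_rings : Prop := Dom_spinning_rings (pvDiffWitness_spinning_rings.1) (pvDiffWitness_spinning_rings.2) ∧ Pre_spinning_rings (pvDiffWitness_spinning_rings.1) (pvDiffWitness_spinning_rings.2) ∧ D_spinning_rings (pvDiffWitness_spinning_rings.1) (pvDiffWitness_spinning_rings.2) ∧ spinning_rings (pvDiffWitness_spinning_rings.1) (pvDiffWitness_spinning_rings.2) = pvDiffWitnessOut_spinning_rings.1 ∧ spinning_rings_alt (pvDiffWitness_spinning_rings.1) (pvDiffWitness_spinning_rings.2) = pvDiffWitnessOut_spinning_rings.2 ∧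 pvDiffWitnessOut_spinning_rings.1 ≠ pvDiffWitnessOut_spinning_rings.2
def Claim_exact_spinning_rings : Prop := ∀ (inner_max : Int) (outer_max : Int), Dom_spinning_rings inner_max outer_max → Pre_spinning_rings inner_max outer_max → D_spinning_rings inner_max outer_max → spinning_rings inner_max outer_max ≠ spinning_rings_alt inner_max outer_max


-- ===== LEMMAS AND PROOFS =====

-- the meeting predicate: after t steps the inner ring shows (-t) % M and the
-- outer ring shows t % N (M = inner_max+1, N = outer_max+1 ring sizes)
def spinP (M N t : Int) : Prop := (-t) % M = t % N

def spinT (M N t : Int) : Prop := 1 ≤ t ∧ spinP M N t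

def spinG (M N : Int) : Int := (Int.gcd M N : Int)
def spinMg (M N : Int) : Int := M / spinG M N
def spinNg (M N : Int) : Int := N / spinG M N

theorem emodEq {a r M : Int} (h0 : 0 ≤ r) (h1 : r < M) (hd : M ∣ a - r) : a % M = r := by
  rw [Int.emod_eq_emod_iff_emod_sub_eq_zero.mpr (Int.emod_eq_zero_of_dvd hd),
      Int.emod_eq_of_lt h0 h1]

theorem emod_le_self {s N : Int} (h : 0 ≤ s) (h2 : 0 < N) : s % N ≤ s := by
  rcases lt_or_ge s N with h3 | h3
  · rw [Int.emod_eq_of_lt h h3]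
  · have := Int.emod_lt_of_pos s h2; omega

theorem stepInn (M s : Int) (hM : 1 ≤ M) :
    (if (-s) % M = 0 then M else (-s) % M) - 1 = (-(s + 1)) % M := by
  have h0 := Int.emod_nonneg (-s) (by omega : M ≠ 0)
  have h1 := Int.emod_lt_of_pos (-s) (by omega : 0 < M)
  have hself : M ∣ (-s) - (-s) % M := by
    have : (-s) - (-s) % M = M * ((-s) / M) := by rw [Int.emod_def]; ring
    exact ⟨(-s) / M, this⟩
  by_cases hz : (-s) % M = 0
  · rw [if_pos hz]
    have hdvd : M ∣ (-s) := Int.dvd_of_emod_eq_zero hz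
    symm; apply emodEq (by omega) (by omega)
    have : -(s + 1) - (M - 1) = (-s) + (-1) * M := by ring
    rw [this]; exact dvd_add hdvd ⟨-1, by ring⟩
  · rw [if_neg hz]
    symm; apply emodEq (by omega) (by omega)
    have : -(s + 1) - ((-s) % M - 1) = (-s) - (-s) % M := by ring
    rw [this]; exact hself

theorem stepOut (N s : Int) (hN : 2 ≤ N) (hs : 0 ≤ s) :
    (if s % N = N - 1 then -1 else s % N) + 1 = (s + 1) % N := by
  have h0 := Int.emod_nonneg s (by omega : N ≠ 0)
  have h1 := Int.emod_lt_of_pos s (by omega : 0 < N)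
  have hself : N ∣ s - s % N := by
    have : s - s % N = N * (s / N) := by rw [Int.emod_def]; ring
    exact ⟨s / N, this⟩
  by_cases hz : s % N = N - 1
  · rw [if_pos hz]
    symm; apply emodEq le_rfl (by omega)
    have : s + 1 - 0 = (s - s % N) + 1 * N := by rw [hz]; ring
    rw [this]; exact dvd_add hself ⟨1, by ring⟩
  · rw [if_neg hz]
    symm; apply emodEq (by omega) (by omega)
    have : s + 1 - (s % N + 1) = s - s % N := by ring
    rw [this]; exact hself

-- A's loop, started at step s in the meeting-at-best regime, returns best
theorem loopA_run (m n best : Int) (hm : 0 ≤ m) (hn : 1 ≤ n)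
    (hTb : spinT (m + 1) (n + 1) best)
    (hmin : ∀ t, spinT (m + 1) (n + 1) t → best ≤ t) :
    ∀ (f : ℕ) (s : Int), 1 ≤ s → s ≤ best → best ≤ s + f →
      spinLoopA m n f ((-s) % (m + 1)) (s % (n + 1)) s = best := by
  intro f
  induction f with
  | zero => intro s h1 h2 h3; simp only [spinLoopA]; omega
  | succ f ih =>
    intro s h1 h2 h3
    simp only [spinLoopA]
    by_cases hc : (-s) % (m + 1) = s % (n + 1)
    · rw [if_pos hc]
      have : best ≤ s := hmin s ⟨h1, hc⟩
      omega
    · rw [if_neg hc]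
      have hsb : s ≠ best := by
        intro h; exact hc (h ▸ hTb.2)
      have e1 : (if (-s) % (m + 1) = 0 then m + 1 else (-s) % (m + 1)) - 1
          = (-(s + 1)) % (m + 1) := stepInn (m + 1) s (by omega)
      have e2 : (if s % (n + 1) = n then -1 else s % (n + 1)) + 1
          = (s + 1) % (n + 1) := by
        have := stepOut (n + 1) s (by omega) (by omega)
        simpa using this
      rw [e1, e2]
      exact ih (s + 1) (by omega) (by omega) (by omega)

-- A's loop in the outer_max = 0 regime: the outer ring value never wraps
theorem loopA2_run (m k : Int) (hk : 0 ≤ k) (hm : m = 2 * k + 1) :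
    ∀ (f : Nat) (s : Int), 1 ≤ s → s ≤ k + 1 → k + 1 ≤ s + f →
      spinLoopA m 0 f ((-s) % (m + 1)) s s = k + 1 := by
  intro f
  induction f with
  | zero => intro s h1 h2 h3; simp only [spinLoopA]; omega
  | succ f ih =>
    intro s h1 h2 h3
    simp only [spinLoopA]
    by_cases hc : (-s) % (m + 1) = s
    · rw [if_pos hc]
      have hself : (m + 1) ∣ ((-s) - (-s) % (m + 1)) :=
        ⟨(-s) / (m + 1), by rw [Int.emod_def]; ring⟩
      rw [hc] at hself
      have h2s : (m + 1) ∣ (2 * s) := by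
        have e : 2 * s = -(-s - s) := by ring
        rw [e]; exact Dvd.dvd.neg_right hself
      obtain ⟨j, hj⟩ := h2s
      have hjge : 1 ≤ j := by nlinarith
      have hjle : j ≤ 1 := by nlinarith
      have hj1 : j = 1 := le_antisymm hjle hjge
      rw [hj1, mul_one] at hj
      omega
    · rw [if_neg hc]
      have e1 : (if (-s) % (m + 1) = 0 then m + 1 else (-s) % (m + 1)) - 1
          = (-(s + 1)) % (m + 1) := stepInn (m + 1) s (by omega)
      have e2 : (if s = (0:Int) then -1 else s) + 1 = s + 1 := by
        rw [if_neg (by omega : ¬ (s = (0:Int)))]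
      have hs_ne : ¬ (s = k + 1) := by
        intro h
        apply hc
        rw [h]
        exact emodEq (by omega) (by omega) (⟨-1, by rw [hm]; ring⟩)
      rw [e1, e2]
      exact ih (s + 1) (by omega) (by omega) (by omega)

-- ---- arithmetic facts about G, Mg, Ng ----

theorem g_pos {M N : Int} (hM : 1 ≤ M) : 0 < spinG M N := by
  have : M ≠ 0 := by omega
  unfold spinG
  exact_mod_cast Nat.pos_of_ne_zero (fun h => this (by simpa using Int.eq_zero_of_gcd_eq_zero_left h))

theorem g_dvd_M (M N : Int) : spinG M N ∣ M := by unfold spinG; exact Int.gcd_dvd_left M N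
theorem g_dvd_N (M N : Int) : spinG M N ∣ N := by unfold spinG; exact Int.gcd_dvd_right M N

theorem M_eq {M N : Int} : spinG M N ∣ M → M = spinG M N * spinMg M N := by
  intro h; rw [spinMg, Int.mul_ediv_cancel' h]

theorem N_eq {M N : Int} : spinG M N ∣ N → N = spinG M N * spinNg M N := by
  intro h; rw [spinNg, Int.mul_ediv_cancel' h]

theorem Mg_pos {M N : Int} (hM : 1 ≤ M) : 0 < spinMg M N := by
  have h1 := g_pos (N := N) hM
  have h2 := M_eq (g_dvd_M M N)
  nlinarith [h2]

theorem cop {M N : Int} (hM : 1 ≤ M) : Int.gcd (spinMg M N) (spinNg M N) = 1 := by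
  have h1 := g_pos (N := N) hM
  have : 0 < Int.gcd M N := by unfold spinG at h1; exact_mod_cast h1
  unfold spinMg spinNg spinG
  exact Int.gcd_ediv_gcd_ediv_gcd this

-- x divisible by both ring sizes is divisible by their lcm N * Mg
theorem spinLcm_dvd {M N x : Int} (hM : 1 ≤ M) (hN : 2 ≤ N)
    (h1 : N ∣ x) (h2 : M ∣ x) : N * spinMg M N ∣ x := by
  obtain ⟨a, ha⟩ := h1
  have hg := g_pos (N := N) hM
  have hMe := M_eq (g_dvd_M M N)
  have hNe := N_eq (g_dvd_N M N)
  have hcop : Int.gcd (spinMg M N) (spinNg M N) = 1 := cop hM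
  set G := spinG M N with hG
  set Amg := spinMg M N with hAmg
  set Bng := spinNg M N with hBng
  clear_value G Amg Bng
  have hMga : Amg ∣ Bng * a := by
    have hGG : G * Amg ∣ G * (Bng * a) := by
      rw [← hMe]
      have e : G * (Bng * a) = N * a := by rw [hNe]; ring
      rw [e, ← ha]
      exact h2
    exact (mul_dvd_mul_iff_left (by omega : G ≠ 0)).mp hGG
  have : Amg ∣ a :=
    Int.dvd_of_dvd_mul_right_of_gcd_one hMga hcop
  obtain ⟨b, hb⟩ := this
  exact ⟨b, by rw [ha, hb]; ring⟩

theorem memT_L {M N : Int} (hM : 1 ≤ M) (hN : 2 ≤ N) : spinT M N (N * spinMg M N) := by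
  have hMg := Mg_pos (N := N) hM
  constructor
  · nlinarith
  · have hMe := M_eq (g_dvd_M M N)
    have hNe := N_eq (g_dvd_N M N)
    have hMd : M ∣ N * spinMg M N := by
      refine ⟨spinNg M N, ?_⟩
      set G := spinG M N with hG
      set Amg := spinMg M N with hAmg
      set Bng := spinNg M N with hBng
      clear_value G Amg Bng
      rw [hMe, hNe]; ring
    have e1 : (-(N * spinMg M N)) % M = 0 :=
      Int.emod_eq_zero_of_dvd (by exact Dvd.dvd.neg_right hMd)
    have e2 : (N * spinMg M N) % N = 0 :=
      Int.emod_eq_zero_of_dvd ⟨spinMg M N, rfl⟩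
    rw [spinP, e1, e2]

-- every meeting step s determines a common value v = s % N with these facts
theorem T_elim {M N s : Int} (hM : 1 ≤ M) (hN : 2 ≤ N) (hs : spinT M N s) :
    0 ≤ s % N ∧ s % N < M ∧ s % N < N ∧ N ∣ s - s % N ∧ M ∣ s + s % N ∧
      spinG M N ∣ 2 * (s % N) := by
  obtain ⟨h1, h2⟩ := hs
  have hv0 := Int.emod_nonneg s (by omega : N ≠ 0)
  have hvN := Int.emod_lt_of_pos s (by omega : 0 < N)
  have hvM : s % N < M := by
    have := Int.emod_lt_of_pos (-s) (by omega : 0 < M)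
    rw [spinP] at h2; omega
  have hNd : N ∣ s - s % N := ⟨s / N, by rw [Int.emod_def]; ring⟩
  have hMd : M ∣ s + s % N := by
    have hself : M ∣ (-s) - (-s) % M := ⟨(-s) / M, by rw [Int.emod_def]; ring⟩
    rw [spinP] at h2
    rw [h2] at hself
    have : s + s % N = -((-s) - s % N) := by ring
    rw [this]; exact Dvd.dvd.neg_right hself
  refine ⟨hv0, hvM, hvN, hNd, hMd, ?_⟩
  have hgN : spinG M N ∣ s - s % N := dvd_trans (g_dvd_N M N) hNd
  have hgM : spinG M N ∣ s + s % N := dvd_trans (g_dvd_M M N) hMd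
  have : 2 * (s % N) = (s + s % N) - (s - s % N) := by ring
  rw [this]; exact dvd_sub hgM hgN

theorem T_ge_L {M N s : Int} (hM : 1 ≤ M) (hN : 2 ≤ N) (hs : spinT M N s)
    (hv : s % N = 0) : N * spinMg M N ≤ s := by
  have h1s := hs.1
  obtain ⟨_, _, _, hNd, hMd, _⟩ := T_elim hM hN hs
  rw [hv] at hNd hMd
  simp only [sub_zero] at hNd
  simp only [add_zero] at hMd
  exact Int.le_of_dvd (by omega) (spinLcm_dvd hM hN hNd hMd)

-- the CRT candidate the B loop computes for common value v
theorem cand_spec {M N u v : Int} (hM : 1 ≤ M) (hN : 2 ≤ N)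
    (hu : 1 < spinMg M N → spinMg M N ∣ spinNg M N * u - 1)
    (h1 : 1 ≤ v) (h2 : v < min M N) (hsol : spinG M N ∣ 2 * v) :
    spinT M N (v + N * ((PySem.Int.floordiv (-2 * v) (spinG M N) * u) % spinMg M N))
    ∧ (v + N * ((PySem.Int.floordiv (-2 * v) (spinG M N) * u) % spinMg M N)) % N = v
    ∧ ∀ s, spinT M N s → s % N = v →
        v + N * ((PySem.Int.floordiv (-2 * v) (spinG M N) * u) % spinMg M N) ≤ s := by
  have hg := g_pos (N := N) hM
  have hMg := Mg_pos (N := N) hM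
  have hMe := M_eq (g_dvd_M M N)
  have hNe := N_eq (g_dvd_N M N)
  set G := spinG M N with hG
  set Mg := spinMg M N with hMg'
  set Ng := spinNg M N with hNg'
  set k := (PySem.Int.floordiv (-2 * v) G * u) % Mg with hk
  have hk0 : 0 ≤ k := Int.emod_nonneg _ (by omega)
  have hk1 : k < Mg := Int.emod_lt_of_pos _ hMg
  set t := v + N * k with ht
  have ht1 : 1 ≤ t := by nlinarith
  have htL : t < N * Mg := by nlinarith [(by omega : v < N)]
  -- t ≡ v (mod N)
  have htN : t % N = v := emodEq (by omega) (by omega) ⟨k, by rw [ht]; ring⟩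
  -- M ∣ t + v
  have htM : M ∣ t + v := by
    obtain ⟨w, hw⟩ := hsol
    have hfd : PySem.Int.floordiv (-2 * v) G = -w := by
      rw [PySem.Int.floordiv_eq_ediv_of_pos hg]
      have h' : -2 * v = G * (-w) := by
        rw [show (-2 : Int) * v = -(2 * v) by ring, hw]; ring
      rw [h', Int.mul_ediv_cancel_left _ (by omega : G ≠ 0)]
    rcases lt_or_ge 1 Mg with hMg1 | hMg1
    · have hinv := hu hMg1
      have hkc : Mg ∣ k - (-w) * u :=
        ⟨-((-w * u) / Mg), by rw [hk, hfd, Int.emod_def]; ring⟩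
      have key : Mg ∣ w + Ng * k := by
        have e : w + Ng * k = Ng * (k - (-w) * u) + (-w) * (Ng * u - 1) := by ring
        rw [e]
        exact dvd_add (Dvd.dvd.mul_left hkc Ng) (Dvd.dvd.mul_left hinv (-w))
      obtain ⟨c, hc⟩ := key
      refine ⟨c, ?_⟩
      have he : t + v = G * w + N * k := by rw [ht]; linear_combination hw
      rw [he, hMe, hNe]
      nth_rewrite 1 [show G * w + G * Ng * k = G * (w + Ng * k) by ring]
      rw [hc]; ring
    · have hk0' : k = 0 := by omega
      have he : t + v = 2 * v := by rw [ht, hk0']; ring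
      have h1' : Mg = 1 := by omega
      have hMG : M = G := by rw [hMe, h1', mul_one]
      rw [he, hMG]; exact ⟨w, hw⟩
  have hP : spinP M N t := by
    rw [spinP, htN]
    exact emodEq (by omega) (by omega) (by
      have : -t - v = -(t + v) := by ring
      rw [this]; exact Dvd.dvd.neg_right htM)
  refine ⟨⟨ht1, hP⟩, htN, ?_⟩
  intro s hs hsv
  obtain ⟨_, _, _, hNd, hMd, _⟩ := T_elim hM hN hs
  rw [hsv] at hNd hMd
  have hNst : N ∣ s - t := by
    have : s - t = (s - v) - (t - v) := by ring
    rw [this]; exact dvd_sub hNd ⟨k, by rw [ht]; ring⟩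
  have hMst : M ∣ s - t := by
    have : s - t = (s + v) - (t + v) := by ring
    rw [this]; exact dvd_sub hMd htM
  have hL : N * Mg ∣ s - t := spinLcm_dvd hM hN hNst hMst
  by_contra hlt
  have hlt : s < t := by omega
  obtain ⟨j, hj⟩ := hL
  have h1s : 1 ≤ s := hs.1
  have hj1 : N * Mg * j ≤ -1 := by omega
  have hjneg : j ≤ -1 := by nlinarith
  nlinarith

-- the B loop returns the least meeting step, by induction along the range
theorem loopB_run {M N u : Int} (hM : 1 ≤ M) (hN : 2 ≤ N)
    (hu : 1 < spinMg M N → spinMg M N ∣ spinNg M N * u - 1) :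
    ∀ (c : ℕ) (lo best : Int), (min M N - lo).toNat ≤ c → 1 ≤ lo →
      spinT M N best →
      (∀ s, spinT M N s → s % N < lo → best ≤ s) →
      spinT M N (spinLoopB (spinG M N) u N (spinMg M N)
          (PySem.List.pyRange lo (min M N) 1) best)
      ∧ ∀ s, spinT M N s →
          spinLoopB (spinG M N) u N (spinMg M N)
            (PySem.List.pyRange lo (min M N) 1) best ≤ s := by
  intro c
  induction c with
  | zero =>
    intro lo best hc hlo hbT hinv
    have hnil : min M N ≤ lo := by omega
    rw [PySem.List.pyRange_one_eq_nil hnil]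
    simp only [spinLoopB]
    refine ⟨hbT, fun s hs => ?_⟩
    obtain ⟨hv0, hvM, hvN, _, _, _⟩ := T_elim hM hN hs
    exact hinv s hs (by omega)
  | succ c ih =>
    intro lo best hc hlo hbT hinv
    rcases lt_or_ge lo (min M N) with hlt | hge
    swap
    · rw [PySem.List.pyRange_one_eq_nil hge]
      simp only [spinLoopB]
      refine ⟨hbT, fun s hs => ?_⟩
      obtain ⟨hv0, hvM, hvN, _, _, _⟩ := T_elim hM hN hs
      exact hinv s hs (by omega)
    rw [PySem.List.pyRange_one_cons hlt]
    simp only [spinLoopB]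
    by_cases hbrk : best ≤ lo
    · rw [if_pos hbrk]
      refine ⟨hbT, fun s hs => ?_⟩
      rcases lt_or_ge (s % N) lo with h | h
      · exact hinv s hs h
      · have h1s := hs.1
        have : s % N ≤ s := emod_le_self (by omega) (by omega)
        omega
    rw [if_neg hbrk]
    by_cases hsol : PySem.Int.mod (2 * lo) (spinG M N) = 0
    · rw [if_pos hsol]
      have hsol' : spinG M N ∣ 2 * lo := (PySem.Int.mod_eq_zero_iff_dvd _ _).mp hsol
      obtain ⟨hcT, hcN, hcmin⟩ := cand_spec (u := u) hM hN hu (by omega) hlt hsol'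
      set cand := lo + N * ((PySem.Int.floordiv (-2 * lo) (spinG M N) * u) % spinMg M N) with hcd
      have hmod : PySem.Int.mod (PySem.Int.floordiv (-2 * lo) (spinG M N) * u) (spinMg M N)
          = (PySem.Int.floordiv (-2 * lo) (spinG M N) * u) % spinMg M N :=
        PySem.Int.mod_eq_emod_of_pos (Mg_pos hM)
      rw [hmod]
      apply ih (lo + 1) _ (by omega) (by omega)
      · split
        · exact hcT
        · exact hbT
      · intro s hs hv
        rcases lt_or_ge (s % N) lo with h | h
        · have := hinv s hs h
          split <;> omega
        · have hveq : s % N = lo := by omega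
          have := hcmin s hs hveq
          split <;> omega
    · rw [if_neg hsol]
      apply ih (lo + 1) _ (by omega) (by omega) hbT
      intro s hs hv
      obtain ⟨_, _, _, _, _, hg2⟩ := T_elim hM hN hs
      have : s % N ≠ lo := by
        intro h
        rw [h] at hg2
        exact hsol ((PySem.Int.mod_eq_zero_iff_dvd _ _).mpr hg2)
      exact hinv s hs (by omega)

-- Source B's _gcd equals Int.gcd on nonnegative arguments
theorem spinGcdF_eq : ∀ (f : ℕ) (a b : Int), 0 ≤ a → 0 ≤ b → b.natAbs < f →
    spinGcdF f a b = (Int.gcd a b : Int) := by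
  intro f
  induction f with
  | zero => intro a b _ _ h; omega
  | succ f ih =>
    intro a b ha hb hf
    simp only [spinGcdF]
    by_cases hz : b = 0
    · rw [if_pos hz, hz]
      have e : Int.gcd a 0 = a.natAbs := by simp [Int.gcd]
      rw [e]
      exact (Int.natAbs_of_nonneg ha).symm
    · rw [if_neg hz]
      have hbpos : 0 < b := by omega
      rw [PySem.Int.mod_eq_emod_of_pos hbpos]
      have h1 : 0 ≤ a % b := Int.emod_nonneg a hz
      have h2 : a % b < b := Int.emod_lt_of_pos a hbpos
      rw [ih b (a % b) hb h1 (by omega)]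
      rw [Int.gcd_comm]
      congr 1
      exact Int.gcd_emod a b

-- the ported pow((N//g) % Mg, -1, Mg) is an inverse of Ng modulo Mg
theorem inv_spec {M N : Int} (hM : 1 ≤ M) (hN : 2 ≤ N) (hMg : 1 < spinMg M N) :
    spinMg M N ∣ spinNg M N *
      (PySem.Int.mod
        (Nat.gcdA (PySem.Int.mod (PySem.Int.floordiv N (spinG M N)) (spinMg M N)).toNat
          (spinMg M N).toNat) (spinMg M N)) - 1 := by
  have hg := g_pos (N := N) hM
  have hMgp : (0:Int) < spinMg M N := by omega
  set G := spinG M N with hG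
  set Mg := spinMg M N with hMg'
  set Ng := spinNg M N with hNg'
  have hfd : PySem.Int.floordiv N G = Ng := PySem.Int.floordiv_eq_ediv_of_pos hg
  rw [hfd]
  set x := PySem.Int.mod Ng Mg with hx
  have hxe : x = Ng % Mg := PySem.Int.mod_eq_emod_of_pos hMgp
  have hx0 : 0 ≤ x := by rw [hxe]; exact Int.emod_nonneg Ng (by omega)
  have hx1 : x < Mg := by rw [hxe]; exact Int.emod_lt_of_pos Ng hMgp
  set A := (Nat.gcdA x.toNat Mg.toNat : Int) with hA
  set uu := PySem.Int.mod A Mg with huu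
  have huue : uu = A % Mg := PySem.Int.mod_eq_emod_of_pos hMgp
  -- gcd(x, Mg) = 1
  have hcop : Nat.gcd x.toNat Mg.toNat = 1 := by
    have e1 : Int.gcd x Mg = Nat.gcd x.toNat Mg.toNat := by
      have ex : x.natAbs = x.toNat := by omega
      have eM : Mg.natAbs = Mg.toNat := by omega
      rw [Int.gcd, ex, eM]
    have e2 : Int.gcd x Mg = 1 := by
      rw [hxe, Int.gcd_emod, Int.gcd_comm]
      exact cop hM
    omega
  have hbez := Nat.gcd_eq_gcd_ab x.toNat Mg.toNat
  rw [hcop] at hbez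
  have hxt : (x.toNat : Int) = x := Int.toNat_of_nonneg hx0
  have hMt : (Mg.toNat : Int) = Mg := Int.toNat_of_nonneg (le_of_lt hMgp)
  rw [hxt, hMt] at hbez
  -- Mg | x*A - 1
  have hxA : Mg ∣ x * A - 1 := by
    refine ⟨-(Nat.gcdB x.toNat Mg.toNat), ?_⟩
    push_cast at hbez ⊢
    nlinarith [hbez]
  have hd1 : Mg ∣ Ng * uu - x * uu := by
    have hNx : Mg ∣ Ng - x := by
      rw [hxe]
      exact ⟨Ng / Mg, by rw [Int.emod_def]; ring⟩
    have : Ng * uu - x * uu = (Ng - x) * uu := by ring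
    rw [this]; exact Dvd.dvd.mul_right hNx uu
  have hd2 : Mg ∣ x * uu - x * A := by
    have hkA : Mg ∣ uu - A :=
      ⟨-(A / Mg), by rw [huue, Int.emod_def]; ring⟩
    have : x * uu - x * A = x * (uu - A) := by ring
    rw [this]; exact Dvd.dvd.mul_left hkA x
  have : Ng * uu - 1 = (Ng * uu - x * uu) + (x * uu - x * A) + (x * A - 1) := by ring
  rw [this]
  exact dvd_add (dvd_add hd1 hd2) hxA

-- characterization of B: its result is the least meeting step
theorem alt_spec (m n : Int) (hm : 0 ≤ m) (hn : 1 ≤ n) :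
    spinT (m + 1) (n + 1) (spinning_rings_alt m n)
    ∧ ∀ s, spinT (m + 1) (n + 1) s → spinning_rings_alt m n ≤ s := by
  have hM : (1:Int) ≤ m + 1 := by omega
  have hN : (2:Int) ≤ n + 1 := by omega
  set M := m + 1
  set N := n + 1
  have hgcd : spinGcd M N = spinG M N :=
    spinGcdF_eq (N.natAbs + 1) M N (by omega) (by omega) (by omega)
  have hfd : PySem.Int.floordiv M (spinG M N) = spinMg M N :=
    PySem.Int.floordiv_eq_ediv_of_pos (g_pos hM)
  show spinT M N (spinning_rings_alt m n) ∧ _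
  have halt : spinning_rings_alt m n
      = spinLoopB (spinG M N)
          (if 1 < spinMg M N then
            PySem.Int.mod
              (Nat.gcdA (PySem.Int.mod (PySem.Int.floordiv N (spinG M N)) (spinMg M N)).toNat
                (spinMg M N).toNat) (spinMg M N)
           else 0)
          N (spinMg M N) (PySem.List.pyRange 1 (min M N) 1) (N * spinMg M N) := by
    rw [spinning_rings_alt]
    rw [hgcd, hfd]
  rw [halt]
  have hu : 1 < spinMg M N → spinMg M N ∣ spinNg M N *
      (if 1 < spinMg M N then
        PySem.Int.mod
          (Nat.gcdA (PySem.Int.mod (PySem.Int.floordiv N (spinG M N)) (spinMg M N)).toNat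
            (spinMg M N).toNat) (spinMg M N)
       else 0) - 1 := by
    intro h
    rw [if_pos h]
    exact inv_spec hM hN h
  have := loopB_run hM hN hu (min M N - 1).toNat 1 (N * spinMg M N)
    (by omega) (by omega) (memT_L hM hN) ?_
  · exact this
  · intro s hs hv
    obtain ⟨hv0, _, _, _, _, _⟩ := T_elim hM hN hs
    exact T_ge_L hM hN hs (by omega)

-- A = B on Pre_ outside D_ (the regime with outer ring size at least 2)
theorem unchanged_main (m n : Int) (hm : 0 ≤ m) (hn : 1 ≤ n) :
    spinning_rings m n = spinning_rings_alt m n := by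
  obtain ⟨⟨hb1, hbP⟩, hmin⟩ := alt_spec m n hm hn
  have hstart1 : ((-1) % (m + 1) : Int) = m :=
    emodEq (by omega) (by omega) (⟨-1, by ring⟩)
  have hstart2 : ((1:Int) % (n + 1)) = 1 := Int.emod_eq_of_lt (by omega) (by omega)
  have hL := memT_L (M := m + 1) (N := n + 1) (by omega) (by omega)
  have hbL : spinning_rings_alt m n ≤ (n + 1) * spinMg (m + 1) (n + 1) := hmin _ hL
  have hg := g_pos (M := m + 1) (N := n + 1) (by omega)
  have hMgp := Mg_pos (M := m + 1) (N := n + 1) (by omega)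
  have hMe := M_eq (g_dvd_M (m + 1) (n + 1))
  have hMgle : spinMg (m + 1) (n + 1) ≤ m + 1 := by nlinarith
  have hLle : (n + 1) * spinMg (m + 1) (n + 1) ≤ (m + 1) * (n + 1) := by nlinarith
  have hfuel : spinning_rings_alt m n
      ≤ 1 + ((((m + 1) * (n + 1)).toNat + (m + 1).toNat + 1 : Nat) : Int) := by
    have hnn : (0:Int) ≤ (m + 1) * (n + 1) := by positivity
    have htn2 : (((m + 1).toNat : Nat) : Int) = m + 1 := Int.toNat_of_nonneg (by omega)
    push_cast
    rw [Int.toNat_of_nonneg hnn]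
    push_cast at htn2
    omega
  have hrun := loopA_run m n (spinning_rings_alt m n) hm hn ⟨hb1, hbP⟩ hmin
    (((m + 1) * (n + 1)).toNat + (m + 1).toNat + 1) 1 le_rfl hb1 hfuel
  rw [hstart1, hstart2] at hrun
  rw [spinning_rings]
  exact hrun

-- ===== VERDICT (by name: the statement is the Claim_ definition above) =====
theorem spinning_rings_spec : Claim_unchanged_spinning_rings := by
  intro m n hdom hpre hnd
  unfold Pre_spinning_rings at hpre
  unfold D_spinning_rings at hnd
  obtain ⟨hm, hcase⟩ := hpre
  have hn : 1 ≤ n := by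
    rcases hcase with h | ⟨h0, hodd⟩
    · exact h
    · exfalso; apply hnd
      exact ⟨h0, by omega, hodd⟩
  exact unchanged_main m n hm hn

theorem spinning_rings_changed : Claim_changed_spinning_rings := by
  unfold Claim_changed_spinning_rings; decide

theorem spinning_rings_tight : Claim_exact_spinning_rings := by
  intro m n hdom hpre hd
  obtain ⟨hn0, hm1, hodd⟩ := hd
  subst hn0
  obtain ⟨k, hk⟩ : ∃ k : Int, m = 2 * k + 1 := ⟨m / 2, by omega⟩
  have hk0 : (0:Int) ≤ k := by omega
  have hstart1 : ((-1) % (m + 1) : Int) = m :=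
    emodEq (by omega) (by omega) (⟨-1, by ring⟩)
  have hA : spinning_rings m 0 = k + 1 := by
    have hfuel : k + 1
        ≤ 1 + ((((m + 1) * (0 + 1)).toNat + (m + 1).toNat + 1 : Nat) : Int) := by
      have hnn : (0:Int) ≤ (m + 1) * (0 + 1) := by positivity
      have htn : ((((m + 1) * (0 + 1)).toNat : Nat) : Int) = (m + 1) * (0 + 1) :=
        Int.toNat_of_nonneg hnn
      have htn2 : (((m + 1).toNat : Nat) : Int) = m + 1 := Int.toNat_of_nonneg (by omega)
      push_cast
      push_cast at htn htn2
      omega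
    have hrun := loopA2_run m k hk0 hk (((m + 1) * (0 + 1)).toNat + (m + 1).toNat + 1) 1
      le_rfl (by omega) hfuel
    rw [hstart1] at hrun
    rw [spinning_rings]
    exact hrun
  have hB : spinning_rings_alt m 0 = m + 1 := by
    rw [spinning_rings_alt]
    have hgcd : spinGcd (m + 1) (0 + 1) = 1 := by
      have h1 : spinGcd (m + 1) (0 + 1) = ((Int.gcd (m + 1) (0 + 1) : Nat) : Int) :=
        spinGcdF_eq ((0 + 1 : Int).natAbs + 1) (m + 1) (0 + 1) (by omega) (by omega)
          (by omega)
      rw [h1]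
      norm_num [Int.gcd]
    rw [hgcd]
    have hfd : PySem.Int.floordiv (m + 1) 1 = m + 1 := by
      rw [PySem.Int.floordiv_eq_ediv_of_pos (by omega : (0:Int) < 1), Int.ediv_one]
    rw [hfd]
    have hmin2 : min (m + 1) (0 + 1 : Int) = 1 := by omega
    rw [hmin2, PySem.List.pyRange_one_eq_nil le_rfl]
    simp only [spinLoopB]
    ring
  rw [hA, hB]
  omega
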